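-- pv_equiv track=rewrite | github.com/linke131/btcloud | data/plugins/folder/rsync-3.9.0/rsync/rsync_main.py | _check_is_system_path
-- ===== SOURCE A (Python) =====
-- def _check_is_system_path(path) -> bool:
--     """
--     检查是否为系统关键目录
--     @param path: 路径名
--     """
--     if not path:
--         return False
--     if path[-1] != '/':
--         path += '/'
--     for dir_name in ('/usr/', '/var/', '/proc/', '/boot/', '/etc/', '/dev/', '/root/', '/run/', '/sys/', '/tmp/'):
--         if path.startswith(dir_name):
--             return True
--     if path in ['/', '/www/', '/www/server/', '/home/']:
--         return True
--     return False
-- ===== SOURCE B (Python) =====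
-- _SYS_TOPS = {'usr', 'var', 'proc', 'boot', 'etc', 'dev', 'root', 'run', 'sys', 'tmp'}
-- _EXACT = {'/', '/www/', '/www/server/', '/home/'}
--
--
-- def _check_is_system_path(path) -> bool:
--     if not path:
--         return False
--     if path[-1] != '/':
--         path += '/'
--     parts = path.split('/')
--     if parts[0] == '' and parts[1] in _SYS_TOPS:
--         return True
--     return path in _EXACT
-- ===== Notes on version B (the rewrite author's own statement) =====
-- stated objective: idiomatic
-- what changed: B replaces A's loop over ten '/xxx/' prefixes with one split of the path on '/' and a set-membership test of the first path component (plus the unchanged exact-match set lookup).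
import Mathlib
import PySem

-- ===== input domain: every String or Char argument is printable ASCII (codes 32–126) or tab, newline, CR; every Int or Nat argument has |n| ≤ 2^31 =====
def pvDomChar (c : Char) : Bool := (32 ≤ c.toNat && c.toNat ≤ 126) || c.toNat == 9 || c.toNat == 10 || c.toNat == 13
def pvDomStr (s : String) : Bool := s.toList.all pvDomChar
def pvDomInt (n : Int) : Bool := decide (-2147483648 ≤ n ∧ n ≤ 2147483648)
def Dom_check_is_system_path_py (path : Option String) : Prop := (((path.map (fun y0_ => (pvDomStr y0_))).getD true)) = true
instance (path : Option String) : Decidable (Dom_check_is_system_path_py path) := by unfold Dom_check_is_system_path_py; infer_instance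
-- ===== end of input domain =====

-- B replaces A's ten-prefix startswith scan by one split on '/' plus a membership test of the
-- first path segment (more idiomatic; no speed claim).

-- ===== PORT A =====
-- the tuple of system-directory prefixes, as lists of chars
def pvSysPrefixes : List (List Char) :=
  [['/','u','s','r','/'], ['/','v','a','r','/'], ['/','p','r','o','c','/'],
   ['/','b','o','o','t','/'], ['/','e','t','c','/'], ['/','d','e','v','/'],
   ['/','r','o','o','t','/'], ['/','r','u','n','/'], ['/','s','y','s','/'],
   ['/','t','m','p','/']]

-- the exact-match list ['/', '/www/', '/www/server/', '/home/']
def pvExactPaths : List (List Char) :=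
  [['/'], ['/','w','w','w','/'], ['/','w','w','w','/','s','e','r','v','e','r','/'],
   ['/','h','o','m','e','/']]

def check_is_system_path_py (path : Option String) : Bool :=
  match path with
  | none => false                                  -- `if not path` (None)
  | some s =>
    let l := s.toList
    if l = [] then false                           -- `if not path` (empty string)
    else
      -- if path[-1] != '/': path += '/'
      let p := if PySem.List.pyGet? l (-1) ≠ some '/' then l ++ ['/'] else l
      -- for dir_name in (...): if path.startswith(dir_name): return True
      if pvSysPrefixes.any (fun d => PySem.Chars.startswith p d) then true
      -- if path in ['/', '/www/', '/www/server/', '/home/']: return True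
      else if p ∈ pvExactPaths then true
      else false

-- ===== PORT B =====
-- the set of top-level system directory names
def pvSysTops : List (List Char) :=
  [['u','s','r'], ['v','a','r'], ['p','r','o','c'], ['b','o','o','t'], ['e','t','c'],
   ['d','e','v'], ['r','o','o','t'], ['r','u','n'], ['s','y','s'], ['t','m','p']]

def check_is_system_path_py_alt (path : Option String) : Bool :=
  match path with
  | none => false
  | some s =>
    let l := s.toList
    if l = [] then false
    else
      let p := if PySem.List.pyGet? l (-1) ≠ some '/' then l ++ ['/'] else l
      -- parts = path.split('/')
      let parts := PySem.Chars.splitOn p ['/']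
      -- if parts[0] == '' and parts[1] in _SYS_TOPS: return True
      if PySem.List.pyGetD parts 0 [] = [] ∧ PySem.List.pyGetD parts 1 [] ∈ pvSysTops then true
      -- return path in _EXACT
      else decide (p ∈ pvExactPaths)

-- ===== PRECONDITION & SPEC =====
def Spec_check_is_system_path_py (path : Option String) (out : Bool) : Prop := out = check_is_system_path_py_alt path
instance (path : Option String) (out : Bool) : Decidable (Spec_check_is_system_path_py path out) := by unfold Spec_check_is_system_path_py; infer_instance

-- ===== CLAIM (what is proved, stated in full; the proofs are below) =====
def Claim_equal_check_is_system_path_py : Prop := ∀ (path : Option String), Dom_check_is_system_path_py path → Spec_check_is_system_path_py path (check_is_system_path_py path)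

-- ===== LEMMAS AND PROOFS =====

theorem pv_pyIdx_one (n : Nat) (h : 1 < n) : PySem.List.pyIdx? n 1 = some 1 := by
  unfold PySem.List.pyIdx?
  rw [if_pos (by norm_num), if_pos (by exact_mod_cast h)]
  rfl

theorem pv_pyIdx_zero (n : Nat) (h : 0 < n) : PySem.List.pyIdx? n 0 = some 0 := by
  unfold PySem.List.pyIdx?
  rw [if_pos (by norm_num), if_pos (by exact_mod_cast h)]
  rfl

theorem pv_pyGetD_one {α : Type} (x y : α) (ys : List α) (d : α) :
    PySem.List.pyGetD (x :: y :: ys) 1 d = y := by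
  unfold PySem.List.pyGetD PySem.List.pyGet?
  rw [pv_pyIdx_one _ (by simp)]
  rfl

theorem pv_pyGetD_zero {α : Type} (x : α) (ys : List α) (d : α) :
    PySem.List.pyGetD (x :: ys) 0 d = x := by
  unfold PySem.List.pyGetD PySem.List.pyGet?
  rw [pv_pyIdx_zero _ (by simp)]
  rfl

theorem pv_dropWhile_head (p : Char → Bool) :
    ∀ (r : List Char) (x : Char) (xs : List Char), r.dropWhile p = x :: xs → p x = false := by
  intro r
  induction r with
  | nil => intro x xs h; simp at h
  | cons a l ih =>
    intro x xs h
    rw [List.dropWhile_cons] at h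
    split at h
    · exact ih _ _ h
    · next hp => cases h; simpa using hp

theorem pv_split_ne_nil (c : Char) (l : List Char) : List.splitOnP (· == c) l ≠ [] := by
  induction l with
  | nil => simp [List.splitOnP_nil]
  | cons a l ih =>
    rw [List.splitOnP_cons]
    split
    · simp
    · cases h : List.splitOnP (· == c) l with
      | nil => exact absurd h ih
      | cons x xs => simp [List.modifyHead]

-- PySem.Chars.splitOn's fueled loop, on a one-char separator, computes Mathlib's List.splitOnP
theorem pv_go_eq (c : Char) : ∀ (fuel : Nat) (l cur : List Char) (acc : List (List Char)),
    l.length < fuel →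
    PySem.Chars.splitOn.go [c] fuel l cur acc
      = acc.reverse ++ List.modifyHead (fun x => cur.reverse ++ x) (List.splitOnP (· == c) l) := by
  intro fuel
  induction fuel with
  | zero => intro l cur acc h; omega
  | succ fuel ih =>
    intro l cur acc h
    cases l with
    | nil =>
      rw [PySem.Chars.splitOn.go.eq_def]
      simp [List.splitOnP_nil, List.modifyHead]
    | cons a l =>
      rw [PySem.Chars.splitOn.go.eq_def]
      by_cases hac : c = a
      · subst hac
        have hpre : ([c].isPrefixOf (c :: l)) = true := by simp [List.isPrefixOf]
        simp only [hpre, if_true, List.length_cons, List.length_nil, List.drop_succ_cons,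
          List.drop_zero]
        rw [ih _ _ _ (Nat.lt_of_succ_lt_succ h)]
        rw [List.splitOnP_cons]
        simp [List.modifyHead]
        cases List.splitOnP (· == c) l <;> rfl
      · have hpre : ([c].isPrefixOf (a :: l)) = false := by
          have hca : (c == a) = false := by simp [hac]
          simp [List.isPrefixOf, hca]
        simp only [hpre, Bool.false_eq_true, if_false]
        rw [ih _ _ _ (Nat.lt_of_succ_lt_succ (by simpa using h))]
        rw [List.splitOnP_cons]
        have hba : (a == c) = false := by simp; exact fun h => hac h.symm
        cases hs : List.splitOnP (· == c) l with
        | nil => exact absurd hs (pv_split_ne_nil c l)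
        | cons y ys => simp [hba, List.modifyHead]

theorem pv_splitOn_eq (c : Char) (l : List Char) :
    PySem.Chars.splitOn l [c] = List.splitOnP (· == c) l := by
  unfold PySem.Chars.splitOn
  rw [pv_go_eq c _ _ _ _ (by omega)]
  cases h : List.splitOnP (· == c) l with
  | nil => exact absurd h (pv_split_ne_nil c l)
  | cons x xs => simp [List.modifyHead]

theorem pv_head_splitOn (c : Char) (l : List Char) :
    (List.splitOnP (· == c) l).getD 0 [] = l.takeWhile (fun a => !(a == c)) := by
  induction l with
  | nil => simp [List.splitOnP_nil]
  | cons a l ih =>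
    rw [List.splitOnP_cons]
    by_cases h : a = c
    · simp [h]
    · have hb : (a == c) = false := by simp [h]
      cases hs : List.splitOnP (· == c) l with
      | nil => exact absurd hs (pv_split_ne_nil c l)
      | cons x xs =>
        rw [hs] at ih
        simp [hb, List.modifyHead, ← ih]

theorem pv_takeWhile_of_prefix (t u : List Char) (ht : '/' ∉ t) :
    (t ++ '/' :: u).takeWhile (fun a => !(a == '/')) = t := by
  induction t with
  | nil => simp
  | cons a t ih =>
    simp only [List.mem_cons, not_or] at ht
    have ha : (a == '/') = false := by simp; exact fun h => ht.1 h.symm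
    simp [ha, ih ht.2]

-- for a slash-free nonempty t and an r ending in '/', "t/" prefixes r iff t is r's first segment
theorem pv_key (t r : List Char) (_ht : t ≠ []) (htc : '/' ∉ t) (hr : r.getLast? = some '/') :
    (t ++ ['/']).isPrefixOf r = true ↔ r.takeWhile (fun a => !(a == '/')) = t := by
  constructor
  · intro h
    rcases List.isPrefixOf_iff_prefix.1 h with ⟨u, hu⟩
    rw [← hu, List.append_assoc, List.singleton_append]
    exact pv_takeWhile_of_prefix t u htc
  · intro h
    have hsplit := List.takeWhile_append_dropWhile (p := fun a => !(a == '/')) (l := r)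
    cases hd : r.dropWhile (fun a => !(a == '/')) with
    | nil =>
      exfalso
      have hrt : r = t := by rw [← hsplit, h, hd, List.append_nil]
      exact htc (hrt ▸ List.mem_of_getLast? hr)
    | cons x xs =>
      have hx' : x = '/' := by
        have := pv_dropWhile_head (fun a => !(a == '/')) r x xs hd
        simpa using this
      apply List.isPrefixOf_iff_prefix.2
      refine ⟨xs, ?_⟩
      rw [List.append_assoc, List.singleton_append, ← hx', ← hd, ← h]
      exact hsplit

theorem pv_any_eq (r : List Char) (hr : r.getLast? = some '/') :
    pvSysTops.any (fun t => (t ++ ['/']).isPrefixOf r)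
      = decide ((List.splitOnP (· == '/') r).getD 0 [] ∈ pvSysTops) := by
  have htops : ∀ t ∈ pvSysTops, t ≠ [] ∧ '/' ∉ t := by decide
  rw [Bool.eq_iff_iff]
  simp only [List.any_eq_true, decide_eq_true_eq, pv_head_splitOn]
  constructor
  · rintro ⟨t, htm, hp⟩
    obtain ⟨h1, h2⟩ := htops t htm
    rw [(pv_key t r h1 h2 hr).1 hp]
    exact htm
  · intro hm
    refine ⟨_, hm, ?_⟩
    obtain ⟨h1, h2⟩ := htops _ hm
    exact (pv_key _ r h1 h2 hr).2 rfl

theorem pv_prefixes_map : pvSysPrefixes = pvSysTops.map (fun t => '/' :: (t ++ ['/'])) := by decide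

-- the two bodies agree on any normalized path p (nonempty, ending in '/')
theorem pv_core (p : List Char) (hpl : p.getLast? = some '/') :
    (if pvSysPrefixes.any (fun d => PySem.Chars.startswith p d) then true
     else if p ∈ pvExactPaths then true else false)
    = (if PySem.List.pyGetD (PySem.Chars.splitOn p ['/']) 0 [] = []
          ∧ PySem.List.pyGetD (PySem.Chars.splitOn p ['/']) 1 [] ∈ pvSysTops then true
       else decide (p ∈ pvExactPaths)) := by
  obtain ⟨a, r, rfl⟩ : ∃ a r, p = a :: r := by
    cases p with
    | nil => simp at hpl
    | cons a r => exact ⟨a, r, rfl⟩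
  have hmain :
      pvSysPrefixes.any (fun d => PySem.Chars.startswith (a :: r) d)
        = decide (PySem.List.pyGetD (PySem.Chars.splitOn (a :: r) ['/']) 0 [] = []
            ∧ PySem.List.pyGetD (PySem.Chars.splitOn (a :: r) ['/']) 1 [] ∈ pvSysTops) := by
    rw [pv_splitOn_eq, pv_prefixes_map, List.any_map, List.splitOnP_cons]
    by_cases ha : a = '/'
    · subst ha
      simp only [beq_self_eq_true, if_true]
      have hsw : ∀ t : List Char,
          PySem.Chars.startswith ('/' :: r) ('/' :: (t ++ ['/'])) = (t ++ ['/']).isPrefixOf r := by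
        intro t; simp [PySem.Chars.startswith, List.isPrefixOf]
      simp only [Function.comp_def, hsw]
      rcases List.eq_nil_or_concat r with rfl | ⟨r', x, rfl⟩
      · decide
      · simp only [List.concat_eq_append] at hpl ⊢
        have hr' : (r' ++ [x]).getLast? = some '/' := by
          rw [List.getLast?_concat]
          rw [← List.cons_append, List.getLast?_concat] at hpl
          exact hpl
        rw [pv_any_eq (r' ++ [x]) hr']
        cases hs : List.splitOnP (· == '/') (r' ++ [x]) with
        | nil => exact absurd hs (pv_split_ne_nil _ _)
        | cons y ys =>
          simp only [pv_pyGetD_zero, pv_pyGetD_one]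
          simp
    · have hba : ((a : Char) == '/') = false := by simp [ha]
      rw [hba]
      simp only [Bool.false_eq_true, if_false]
      have hsw : ∀ t : List Char,
          PySem.Chars.startswith (a :: r) ('/' :: (t ++ ['/'])) = false := by
        intro t
        have h1 : (('/' : Char) == a) = false := by simp; exact fun h => ha h.symm
        simp [PySem.Chars.startswith, List.isPrefixOf, h1]
      simp only [Function.comp_def, hsw]
      cases hs : List.splitOnP (· == '/') r with
      | nil => exact absurd hs (pv_split_ne_nil '/' r)
      | cons y ys =>
        simp only [List.modifyHead, pv_pyGetD_zero]
        simp
  rw [hmain]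
  by_cases hc : PySem.List.pyGetD (PySem.Chars.splitOn (a :: r) ['/']) 0 [] = []
      ∧ PySem.List.pyGetD (PySem.Chars.splitOn (a :: r) ['/']) 1 [] ∈ pvSysTops
  · simp [hc]
  · by_cases he : (a :: r) ∈ pvExactPaths <;> simp [hc, he]

-- ===== VERDICT (by name: the statement is the Claim_ definition above) =====
theorem check_is_system_path_py_spec : Claim_equal_check_is_system_path_py := by
  intro path _
  unfold Spec_check_is_system_path_py check_is_system_path_py check_is_system_path_py_alt
  cases path with
  | none => rfl
  | some s =>
    simp only
    by_cases hl : s.toList = []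
    · simp [hl]
    · rw [if_neg hl, if_neg hl]
      have hpl : (if PySem.List.pyGet? s.toList (-1) ≠ some '/' then s.toList ++ ['/'] else s.toList).getLast? = some '/' := by
        split
        · exact List.getLast?_concat
        · next h => simpa [PySem.List.pyGet?_neg_one] using h
      exact pv_core _ hpl
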